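-- pv_equiv track=rewrite | github.com/SehaniSenevirathne/DC | master.py | distribute_workload
-- ===== SOURCE A (Python) =====
-- def distribute_workload(nodes, passwords):
--     workload_schedule = {}
--     num_nodes = len(nodes)
--     num_passwords = len(passwords)
--     passwords_per_node = num_passwords // num_nodes
--     remaining_passwords = num_passwords % num_nodes
--
--     start_idx = 0
--     for node in nodes:
--         end_idx = start_idx + passwords_per_node
--         if remaining_passwords > 0:
--             end_idx += 1
--             remaining_passwords -= 1
--         workload_schedule[node] = (start_idx, end_idx)
--         start_idx = end_idx
--
--     return workload_schedule
-- ===== SOURCE B (Python) =====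
-- def distribute_workload(nodes, passwords):
--     q = len(passwords) // len(nodes)
--     r = len(passwords) % len(nodes)
--     schedule = {}
--     for i, node in enumerate(nodes):
--         start = i * q + min(i, r)
--         schedule[node] = (start, start + q + (1 if i < r else 0))
--     return schedule
-- ===== Notes on version B (the rewrite author's own statement) =====
-- stated objective: alternative
-- what changed: Replaces the carried start_idx accumulator and the mutated remaining_passwords counter with a closed-form window computed independently per node from its enumerate index (start = i*q + min(i, r)).
import Mathlib
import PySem

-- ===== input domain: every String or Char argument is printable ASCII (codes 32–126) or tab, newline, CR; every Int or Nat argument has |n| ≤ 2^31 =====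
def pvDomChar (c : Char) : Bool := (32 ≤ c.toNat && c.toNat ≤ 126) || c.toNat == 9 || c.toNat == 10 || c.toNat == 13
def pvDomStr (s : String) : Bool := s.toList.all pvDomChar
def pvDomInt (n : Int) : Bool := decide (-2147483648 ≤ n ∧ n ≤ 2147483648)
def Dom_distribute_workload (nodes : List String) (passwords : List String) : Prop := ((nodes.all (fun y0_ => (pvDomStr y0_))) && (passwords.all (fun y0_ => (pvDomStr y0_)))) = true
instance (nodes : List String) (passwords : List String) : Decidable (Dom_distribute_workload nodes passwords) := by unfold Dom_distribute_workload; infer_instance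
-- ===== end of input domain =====

-- B replaces A's carried start_idx/remaining_passwords state with a per-index closed-form window (alternative decomposition, same cost).


-- ===== PORT A =====
-- loop body of A: state = (dict, start_idx, remaining_passwords)
def dwStepA (q : Int) (s : PySem.Dict String (Int × Int) × Int × Int) (node : String) :
    PySem.Dict String (Int × Int) × Int × Int :=
  let d := s.1
  let start_idx := s.2.1
  let rem := s.2.2
  let end_idx := start_idx + q
  let end_idx' := if rem > 0 then end_idx + 1 else end_idx
  let rem' := if rem > 0 then rem - 1 else rem
  (d.insert node (start_idx, end_idx'), end_idx', rem')

def distribute_workload (nodes : List String) (passwords : List String) : List (String × Int × Int) :=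
  let num_nodes : Int := nodes.length
  let num_passwords : Int := passwords.length
  let passwords_per_node := PySem.Int.floordiv num_passwords num_nodes
  let remaining_passwords := PySem.Int.mod num_passwords num_nodes
  (nodes.foldl (dwStepA passwords_per_node) (PySem.Dict.empty, 0, remaining_passwords)).1.items

-- ===== PORT B =====
-- loop body of B: each node's window computed from its enumerate index alone
def dwStepB (q r : Int) (d : PySem.Dict String (Int × Int)) (p : Int × String) :
    PySem.Dict String (Int × Int) :=
  let start := p.1 * q + min p.1 r
  d.insert p.2 (start, start + q + (if p.1 < r then 1 else 0))

def distribute_workload_alt (nodes : List String) (passwords : List String) : List (String × Int × Int) :=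
  let q := PySem.Int.floordiv (passwords.length : Int) (nodes.length : Int)
  let r := PySem.Int.mod (passwords.length : Int) (nodes.length : Int)
  ((PySem.List.enumerate nodes 0).foldl (dwStepB q r) PySem.Dict.empty).items

-- ===== PRECONDITION & SPEC =====
-- Pre_ excludes only nodes = [], on which Python A raises ZeroDivisionError.
def Pre_distribute_workload (nodes : List String) (passwords : List String) : Prop := nodes ≠ []
instance (nodes : List String) (passwords : List String) : Decidable (Pre_distribute_workload nodes passwords) := by unfold Pre_distribute_workload; infer_instance
def pvWitness_distribute_workload : List String × List String := (["n1", "n2"], ["p1", "p2", "p3"])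

def Spec_distribute_workload (nodes : List String) (passwords : List String) (out : List (String × Int × Int)) : Prop := out = distribute_workload_alt nodes passwords
instance (nodes : List String) (passwords : List String) (out : List (String × Int × Int)) : Decidable (Spec_distribute_workload nodes passwords out) := by unfold Spec_distribute_workload; infer_instance

-- ===== CLAIM (what is proved, stated in full; the proofs are below) =====
def Claim_equal_distribute_workload : Prop := ∀ (nodes : List String) (passwords : List String), Dom_distribute_workload nodes passwords → Pre_distribute_workload nodes passwords → Spec_distribute_workload nodes passwords (distribute_workload nodes passwords)

-- ===== LEMMAS AND PROOFS =====

-- Loop invariant: starting A's loop at index i with start = i*q + min i r and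
-- remaining = max (r - i) 0 produces B's dict (and the closed-form final state).
theorem dw_loop_eq (q r : Int) :
    ∀ (ns : List String) (d : PySem.Dict String (Int × Int)) (i : Int), 0 ≤ i →
      ns.foldl (dwStepA q) (d, i * q + min i r, max (r - i) 0) =
        ((PySem.List.enumerate ns i).foldl (dwStepB q r) d,
          (i + ns.length) * q + min (i + ns.length) r,
          max (r - (i + ns.length)) 0) := by
  intro ns
  induction ns with
  | nil =>
    intro d i hi
    simp [PySem.List.enumerate_nil]
  | cons x xs ih =>
    intro d i hi
    rw [PySem.List.enumerate_cons]
    simp only [List.foldl_cons]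
    have hstep : dwStepA q (d, i * q + min i r, max (r - i) 0) x =
        (dwStepB q r d (i, x), (i + 1) * q + min (i + 1) r, max (r - (i + 1)) 0) := by
      by_cases h : i < r
      · have hc : max (r - i) 0 > 0 := by omega
        have he : (i * q + min i r + q + 1 : Int) = (i + 1) * q + min (i + 1) r := by
          rw [show min i r = i from by omega, show min (i + 1) r = i + 1 from by omega]; ring
        have hm : (max (r - i) 0 - 1 : Int) = max (r - (i + 1)) 0 := by omega
        simp only [dwStepA, dwStepB, if_pos hc, if_pos h]
        rw [← he, ← hm]
      · have hc : ¬ (max (r - i) 0 > 0) := by omega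
        have he : (i * q + min i r + q : Int) = (i + 1) * q + min (i + 1) r := by
          rw [show min i r = r from by omega, show min (i + 1) r = r from by omega]; ring
        have hm : (max (r - i) 0 : Int) = max (r - (i + 1)) 0 := by omega
        simp only [dwStepA, dwStepB, if_neg hc, if_neg h, add_zero]
        rw [← he, ← hm]
    rw [hstep, ih (dwStepB q r d (i, x)) (i + 1) (by omega)]
    have hl : (i + 1 + (xs.length : Int)) = i + ((x :: xs).length : Int) := by
      simp [List.length_cons]; ring
    rw [hl]

-- ===== VERDICT (by name: the statement is the Claim_ definition above) =====
theorem distribute_workload_spec : Claim_equal_distribute_workload := by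
  intro nodes passwords _ hpre
  simp only [Spec_distribute_workload, distribute_workload, distribute_workload_alt]
  have hn : (0 : Int) < (nodes.length : Int) := by
    have : nodes.length ≠ 0 := by simpa [List.length_eq_zero_iff] using hpre
    omega
  have hr : 0 ≤ PySem.Int.mod (passwords.length : Int) (nodes.length : Int) := by
    rw [PySem.Int.mod_eq_emod_of_pos hn]
    exact Int.emod_nonneg _ (by omega)
  have := dw_loop_eq (PySem.Int.floordiv (passwords.length : Int) (nodes.length : Int))
      (PySem.Int.mod (passwords.length : Int) (nodes.length : Int)) nodes PySem.Dict.empty 0 le_rfl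
  simp only [zero_mul, zero_add, min_eq_left hr, sub_zero, max_eq_left hr] at this
  rw [this]
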